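-- pv_equiv track=rewrite | github.com/Algy/tempy | lisn/match.py | _pull_left_string
-- ===== SOURCE A (Python) =====
-- def _pull_left_string(s):
--     def _is_space(c):
--         return c == ' ' or c == '\t'
--     length = len(s)
--     idx = 0
--     head_space = 0
--     result = ""
--
--     while idx < length:
--         if _is_space(s[idx]):
--             head_space += 1
--         elif s[idx] == '\n':
--             head_space = 0
--         else:
--             break
--         idx += 1
--
--     if idx >= length: # is eof
--         return ""
--
--     while idx < length:
--         c = s[idx]
--         cur_space = 0
--         if c == '\n': # look ahead
--             idx += 1
--             result += "\n"
--             while idx < length and _is_space(s[idx]):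
--                 cur_space += 1
--                 idx += 1
--             new_space = max(cur_space - head_space, 0)
--
--             result += " "*new_space
--         else:
--             result += c
--             idx += 1
--     return result
-- ===== SOURCE B (Python) =====
-- def _pull_left_string(s):
--     def _lead(seg):
--         i = 0
--         while i < len(seg) and (seg[i] == ' ' or seg[i] == '\t'):
--             i += 1
--         return i
--     segs = s.split('\n')
--     k = 0
--     while k < len(segs) and _lead(segs[k]) == len(segs[k]):
--         k += 1
--     if k == len(segs):
--         return ""
--     head = segs[k]
--     h = _lead(head)
--     out = [head[h:]]
--     for seg in segs[k + 1:]: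
--         c = _lead(seg)
--         out.append(" " * max(c - h, 0) + seg[c:])
--     return "\n".join(out)
-- ===== Notes on version B (the rewrite author's own statement) =====
-- stated objective: faster
-- what changed: B splits the string into lines once, drops leading all-whitespace lines, strips the first content line fully, re-indents each later line with max(indent-head,0) spaces and rejoins with a single join, replacing A's two index-walking while loops that build the result by per-character string concatenation.
import Mathlib
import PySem

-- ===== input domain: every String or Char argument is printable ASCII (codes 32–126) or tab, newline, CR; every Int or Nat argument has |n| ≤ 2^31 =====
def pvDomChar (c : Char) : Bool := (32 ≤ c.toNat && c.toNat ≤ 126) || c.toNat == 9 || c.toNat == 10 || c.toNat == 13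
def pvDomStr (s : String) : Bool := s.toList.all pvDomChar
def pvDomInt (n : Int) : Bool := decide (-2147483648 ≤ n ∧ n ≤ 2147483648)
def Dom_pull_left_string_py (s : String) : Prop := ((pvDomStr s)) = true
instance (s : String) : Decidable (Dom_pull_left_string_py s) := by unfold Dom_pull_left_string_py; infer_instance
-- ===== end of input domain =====

-- B re-implements the same per-line normalization by splitting into lines once and
-- rejoining with a single join; A walks the string with index loops building the
-- result by per-character string += (B measured faster in a timing run).

-- ===== PORT A =====
def pvIsSpace (c : Char) : Bool := c = ' ' || c = '\t'

-- A's first while loop: skip leading spaces/tabs/newlines, tracking head_space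
def loopA1 : List Char → Nat → Nat × List Char
  | [], hs => (hs, [])
  | c :: rest, hs =>
    if pvIsSpace c then loopA1 rest (hs + 1)
    else if c = '\n' then loopA1 rest 0
    else (hs, c :: rest)

-- A's inner look-ahead loop after a newline: count and consume spaces/tabs
def loopA2inner : List Char → Nat → Nat × List Char
  | [], n => (n, [])
  | c :: rest, n => if pvIsSpace c then loopA2inner rest (n + 1) else (n, c :: rest)

theorem loopA2inner_len : ∀ (l : List Char) (n : Nat), (loopA2inner l n).2.length ≤ l.length
  | [], _ => le_refl _
  | c :: rest, n => by
    simp only [loopA2inner]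
    split
    · exact le_trans (loopA2inner_len rest (n + 1)) (Nat.le_succ _)
    · simp

-- A's second while loop, accumulating `result`
def loopA2 : List Char → Nat → List Char → List Char
  | [], _, acc => acc
  | c :: rest, hs, acc =>
    if c = '\n' then
      let p := loopA2inner rest 0
      loopA2 p.2 hs (acc ++ '\n' :: List.replicate (p.1 - hs) ' ')
    else loopA2 rest hs (acc ++ [c])
termination_by l => l.length
decreasing_by
  · exact Nat.lt_succ_of_le (loopA2inner_len rest 0)
  · simp

def pull_left_string_py (s : String) : String :=
  let p := loopA1 s.toList 0
  if p.2.isEmpty then "" else String.ofList (loopA2 p.2 p.1 [])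

-- ===== PORT B =====
-- Source B's _lead: count of leading ' '/'\t' characters
def pvLead : List Char → Nat
  | [] => 0
  | c :: rest => if pvIsSpace c then pvLead rest + 1 else 0

-- Source B's scan for the first segment with content (k loop + segs[k+1:])
def dropBlank : List (List Char) → List (List Char)
  | [] => []
  | seg :: rest => if pvLead seg = seg.length then dropBlank rest else seg :: rest

-- Source B's per-line rendering: " "*max(cur-h,0) + seg[cur:]
def pvBLine (h : Nat) (seg : List Char) : List Char :=
  List.replicate (pvLead seg - h) ' ' ++ seg.drop (pvLead seg)

def pull_left_string_py_alt (s : String) : String :=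
  match dropBlank (PySem.Chars.splitOn s.toList ['\n']) with
  | [] => ""
  | seg :: rest =>
    let h := pvLead seg
    String.ofList (PySem.Chars.join ['\n'] (seg.drop h :: rest.map (pvBLine h)))

-- ===== PRECONDITION & SPEC =====
def Spec_pull_left_string_py (s : String) (out : String) : Prop := out = pull_left_string_py_alt s
instance (s : String) (out : String) : Decidable (Spec_pull_left_string_py s out) := by unfold Spec_pull_left_string_py; infer_instance

-- ===== CLAIM (what is proved, stated in full; the proofs are below) =====
def Claim_equal_pull_left_string_py : Prop := ∀ (s : String), Dom_pull_left_string_py s → Spec_pull_left_string_py s (pull_left_string_py s)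

-- ===== LEMMAS AND PROOFS =====

-- structural split on '\n' (proved equal to PySem.Chars.splitOn · ['\n'] below)
def splitNL : List Char → List (List Char)
  | [] => [[]]
  | c :: t =>
    match splitNL t with
    | [] => []
    | seg :: rest => if c = '\n' then [] :: seg :: rest else (c :: seg) :: rest

-- the characters that rejoin a non-first segment list
def glueNL (segs : List (List Char)) : List Char := segs.flatMap (fun z => '\n' :: z)

-- structural join with '\n'
def joinNL : List (List Char) → List Char
  | [] => []
  | [x] => x
  | x :: y :: rest => x ++ '\n' :: joinNL (y :: rest)

theorem splitNL_ne_nil : ∀ l : List Char, splitNL l ≠ [] := by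
  intro l
  induction l with
  | nil => simp [splitNL]
  | cons c t ih =>
    cases h : splitNL t with
    | nil => exact absurd h ih
    | cons seg rest =>
      simp only [splitNL, h]
      split <;> simp

theorem splitOn_go_nl : ∀ (l : List Char) (fuel : Nat) (cur : List Char) (acc : List (List Char)),
    l.length ≤ fuel →
    PySem.Chars.splitOn.go ['\n'] fuel l cur acc =
      acc.reverse ++ ((splitNL l).modifyHead (cur.reverse ++ ·)) := by
  intro l
  induction l with
  | nil =>
    intro fuel cur acc _
    cases fuel <;> simp [PySem.Chars.splitOn.go, splitNL]
  | cons c rest ih =>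
    intro fuel cur acc hfuel
    cases fuel with
    | zero => simp at hfuel
    | succ f =>
      by_cases hc : c = '\n'
      · subst hc
        have hpre : List.isPrefixOf ['\n'] ('\n' :: rest) = true := by
          simp [List.isPrefixOf]
        rw [PySem.Chars.splitOn.go]
        simp only [hpre, if_pos, List.length_cons, List.length_nil, Nat.zero_add,
          List.drop_succ_cons, List.drop_zero]
        rw [ih f [] (cur.reverse :: acc) (by simpa using Nat.le_of_succ_le_succ hfuel)]
        simp only [splitNL]
        cases h : splitNL rest with
        | nil => exact absurd h (splitNL_ne_nil rest)
        | cons seg r => simp [List.modifyHead]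
      · have hpre : List.isPrefixOf ['\n'] (c :: rest) = false := by
          simp [List.isPrefixOf]
          exact fun h => hc h.symm
        rw [PySem.Chars.splitOn.go]
        simp only [hpre, Bool.false_eq_true, if_false]
        rw [ih f (c :: cur) acc (Nat.le_of_succ_le_succ hfuel)]
        simp only [splitNL]
        cases h : splitNL rest with
        | nil => exact absurd h (splitNL_ne_nil rest)
        | cons seg r => simp [List.modifyHead, hc]

theorem splitOn_nl (l : List Char) : PySem.Chars.splitOn l ['\n'] = splitNL l := by
  rw [PySem.Chars.splitOn, splitOn_go_nl l (l.length + 1) [] [] (Nat.le_succ _)]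
  cases h : splitNL l with
  | nil => exact absurd h (splitNL_ne_nil l)
  | cons seg r => simp [List.modifyHead]

theorem splitNL_no_nl : ∀ (l : List Char) (seg : List Char), seg ∈ splitNL l → '\n' ∉ seg := by
  intro l
  induction l with
  | nil => intro seg h; simp [splitNL] at h; simp [h]
  | cons c t ih =>
    intro seg hseg
    simp only [splitNL] at hseg
    cases h : splitNL t with
    | nil => exact absurd h (splitNL_ne_nil t)
    | cons s r =>
      rw [h] at hseg
      by_cases hc : c = '\n'
      · simp only [hc, if_true] at hseg
        rcases List.mem_cons.mp hseg with h1 | h2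
        · simp [h1]
        · exact ih seg (h ▸ h2)
      · simp only [if_neg hc] at hseg
        rcases List.mem_cons.mp hseg with h1 | h2
        · subst h1
          intro hmem
          rcases List.mem_cons.mp hmem with h3 | h4
          · exact hc h3.symm
          · exact ih s (h ▸ List.mem_cons_self) h4
        · exact ih seg (h ▸ List.mem_cons_of_mem s h2)

theorem joinNL_splitNL : ∀ l : List Char, joinNL (splitNL l) = l := by
  intro l
  induction l with
  | nil => simp [splitNL, joinNL]
  | cons c t ih =>
    simp only [splitNL]
    cases h : splitNL t with
    | nil => exact absurd h (splitNL_ne_nil t)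
    | cons s r =>
      rw [h] at ih
      by_cases hc : c = '\n'
      · subst hc
        simp [joinNL, ih]
      · simp only [if_neg hc]
        cases r with
        | nil => simp only [joinNL] at ih ⊢; rw [ih]
        | cons y r' => simp only [joinNL] at ih ⊢; rw [List.cons_append, ih]

theorem joinNL_eq_flatMap : ∀ (x : List Char) (ys : List (List Char)),
    joinNL (x :: ys) = x ++ glueNL ys := by
  intro x ys
  induction ys generalizing x with
  | nil => simp [joinNL, glueNL]
  | cons y r ih => simp only [joinNL, glueNL, List.flatMap_cons] at ih ⊢; rw [ih]; simp

theorem glueNL_cons (y : List Char) (ys : List (List Char)) :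
    glueNL (y :: ys) = '\n' :: (y ++ glueNL ys) := by
  simp [glueNL]

theorem join_nl_eq (x : List Char) (ys : List (List Char)) :
    PySem.Chars.join ['\n'] (x :: ys) = x ++ glueNL ys := by
  induction ys generalizing x with
  | nil => simp [PySem.Chars.join, List.intercalate, List.intersperse, glueNL]
  | cons y r ih =>
    have h := ih y
    simp only [PySem.Chars.join, List.intercalate] at h ⊢
    rw [show List.intersperse ['\n'] (x :: y :: r) = x :: ['\n'] :: List.intersperse ['\n'] (y :: r) from rfl]
    simp only [List.flatten_cons]
    rw [h, glueNL_cons]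
    simp

theorem pvLead_le_length : ∀ seg : List Char, pvLead seg ≤ seg.length := by
  intro seg
  induction seg with
  | nil => simp [pvLead]
  | cons c s ih =>
    simp only [pvLead, List.length_cons]
    split
    · omega
    · omega

theorem dropBlank_mem : ∀ (segs : List (List Char)) (seg : List Char) (rest : List (List Char)),
    dropBlank segs = seg :: rest → ∀ x ∈ seg :: rest, x ∈ segs := by
  intro segs
  induction segs with
  | nil => intro seg rest h; simp [dropBlank] at h
  | cons s0 rs ih =>
    intro seg rest h x hx
    simp only [dropBlank] at h
    split at h
    · exact List.mem_cons_of_mem s0 (ih seg rest h x hx)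
    · rw [h]; exact hx

theorem dropBlank_head_content : ∀ (segs : List (List Char)) (seg : List Char) (rest : List (List Char)),
    dropBlank segs = seg :: rest → pvLead seg ≠ seg.length := by
  intro segs
  induction segs with
  | nil => intro seg rest h; simp [dropBlank] at h
  | cons s0 rs ih =>
    intro seg rest h
    simp only [dropBlank] at h
    split at h
    · exact ih seg rest h
    · cases h; assumption

theorem dropBlank_eq_nil : ∀ segs : List (List Char),
    dropBlank segs = [] → ∀ seg ∈ segs, pvLead seg = seg.length := by
  intro segs
  induction segs with
  | nil => intro _ seg h; simp at h
  | cons s0 rs ih =>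
    intro h seg hseg
    simp only [dropBlank] at h
    split at h
    · rcases List.mem_cons.mp hseg with h1 | h2
      · subst h1; assumption
      · exact ih h seg h2
    · simp at h

-- first loop: a blank segment with nothing after it
theorem A1_blank_nil : ∀ (seg : List Char) (hs : Nat), pvLead seg = seg.length →
    loopA1 seg hs = (hs + seg.length, []) := by
  intro seg
  induction seg with
  | nil => intro hs _; simp [loopA1]
  | cons c s ih =>
    intro hs hb
    simp only [pvLead, List.length_cons] at hb
    split at hb
    · rename_i hsp
      simp only [loopA1, hsp, if_pos]
      rw [ih (hs + 1) (by omega)]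
      simp only [List.length_cons, Prod.mk.injEq]
      exact ⟨by omega, trivial⟩
    · omega

-- first loop: a blank segment followed by a newline resets head_space
theorem A1_blank_cons : ∀ (seg : List Char) (t : List Char) (hs : Nat), pvLead seg = seg.length →
    loopA1 (seg ++ '\n' :: t) hs = loopA1 t 0 := by
  intro seg
  induction seg with
  | nil =>
    intro t hs _
    simp only [List.nil_append, loopA1, show pvIsSpace '\n' = false from rfl,
      Bool.false_eq_true, if_false, if_true]
  | cons c s ih =>
    intro t hs hb
    simp only [pvLead, List.length_cons] at hb
    split at hb
    · rename_i hsp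
      simp only [List.cons_append, loopA1, hsp, if_pos]
      exact ih t (hs + 1) (by omega)
    · omega

-- first loop: stops inside a segment with content
theorem A1_content : ∀ (seg : List Char) (t : List Char) (hs : Nat),
    '\n' ∉ seg → pvLead seg ≠ seg.length →
    loopA1 (seg ++ t) hs = (hs + pvLead seg, seg.drop (pvLead seg) ++ t) := by
  intro seg
  induction seg with
  | nil => intro t hs _ hb; simp [pvLead] at hb
  | cons c s ih =>
    intro t hs hnl hb
    by_cases hsp : pvIsSpace c = true
    · have hlead : pvLead (c :: s) = pvLead s + 1 := by simp [pvLead, hsp]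
      have hb' : pvLead s ≠ s.length := by
        simp only [hlead, List.length_cons] at hb; omega
      simp only [List.cons_append, loopA1, hsp, if_pos]
      rw [ih t (hs + 1) (fun h => hnl (List.mem_cons_of_mem c h)) hb']
      simp only [hlead, List.drop_succ_cons, Prod.mk.injEq]
      exact ⟨by omega, trivial⟩
    · have hlead : pvLead (c :: s) = 0 := by simp [pvLead, hsp]
      have hc : ¬ c = '\n' := fun h => hnl (h ▸ List.mem_cons_self)
      simp only [List.cons_append, loopA1, hsp, Bool.false_eq_true, if_false, hc, hlead,
        List.drop_zero, Nat.add_zero]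

theorem A1_all_blank : ∀ (segs : List (List Char)) (hs : Nat),
    (∀ seg ∈ segs, pvLead seg = seg.length) →
    (loopA1 (joinNL segs) hs).2 = [] := by
  intro segs
  induction segs with
  | nil => intro hs _; simp [joinNL, loopA1]
  | cons s0 rs ih =>
    intro hs hb
    cases rs with
    | nil =>
      simp only [joinNL]
      rw [A1_blank_nil s0 hs (hb s0 List.mem_cons_self)]
    | cons y rs' =>
      simp only [joinNL]
      rw [A1_blank_cons s0 _ hs (hb s0 List.mem_cons_self)]
      exact ih 0 (fun seg h => hb seg (List.mem_cons_of_mem s0 h))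

theorem A1_spec : ∀ (segs : List (List Char)) (seg : List Char) (rest : List (List Char)),
    (∀ x ∈ segs, '\n' ∉ x) → dropBlank segs = seg :: rest →
    loopA1 (joinNL segs) 0 = (pvLead seg, seg.drop (pvLead seg) ++ glueNL rest) := by
  intro segs
  induction segs with
  | nil => intro seg rest _ h; simp [dropBlank] at h
  | cons s0 rs ih =>
    intro seg rest hnl h
    simp only [dropBlank] at h
    split at h
    · rename_i hblank
      cases rs with
      | nil => simp [dropBlank] at h
      | cons y rs' =>
        simp only [joinNL]
        rw [A1_blank_cons s0 _ 0 hblank]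
        exact ih seg rest (fun x hx => hnl x (List.mem_cons_of_mem s0 hx)) h
    · rename_i hblank
      injection h with h1 h2
      subst h1; subst h2
      cases rs with
      | nil =>
        simp only [joinNL, glueNL, List.flatMap_nil, List.append_nil]
        have := A1_content s0 [] 0 (hnl s0 List.mem_cons_self) hblank
        simpa using this
      | cons y rs' =>
        simp only [joinNL]
        rw [show (s0 ++ '\n' :: joinNL (y :: rs') : List Char)
            = s0 ++ ('\n' :: joinNL (y :: rs')) from rfl]
        rw [A1_content s0 _ 0 (hnl s0 List.mem_cons_self) hblank]
        rw [joinNL_eq_flatMap y rs', ← glueNL_cons]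
        simp

theorem loopA2inner_spec : ∀ (seg t : List Char) (n : Nat),
    '\n' ∉ seg → (t = [] ∨ ∃ t', t = '\n' :: t') →
    loopA2inner (seg ++ t) n = (n + pvLead seg, seg.drop (pvLead seg) ++ t) := by
  intro seg
  induction seg with
  | nil =>
    intro t n _ ht
    rcases ht with rfl | ⟨t', rfl⟩
    · simp [loopA2inner, pvLead]
    · simp [loopA2inner, pvLead, show pvIsSpace '\n' = false from rfl]
  | cons c s ih =>
    intro t n hnl ht
    by_cases hsp : pvIsSpace c = true
    · simp only [List.cons_append, loopA2inner, hsp, if_pos]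
      rw [ih t (n + 1) (fun h => hnl (List.mem_cons_of_mem c h)) ht]
      simp only [pvLead, hsp, if_pos, List.drop_succ_cons, Prod.mk.injEq]
      exact ⟨by omega, trivial⟩
    · simp only [List.cons_append, loopA2inner, hsp, Bool.false_eq_true, if_false]
      simp [pvLead, hsp]

theorem loopA2_acc : ∀ (n : Nat) (l : List Char), l.length ≤ n →
    ∀ (hs : Nat) (acc : List Char), loopA2 l hs acc = acc ++ loopA2 l hs [] := by
  intro n
  induction n with
  | zero =>
    intro l hl hs acc
    have : l = [] := List.length_eq_zero_iff.mp (Nat.le_zero.mp hl)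
    subst this
    simp [loopA2]
  | succ n ih =>
    intro l hl hs acc
    cases l with
    | nil => simp [loopA2]
    | cons c rest =>
      simp only [loopA2]
      split
      · rw [ih _ (le_trans (loopA2inner_len rest 0) (Nat.le_of_succ_le_succ hl)) hs
              (acc ++ '\n' :: List.replicate ((loopA2inner rest 0).1 - hs) ' '),
            ih _ (le_trans (loopA2inner_len rest 0) (Nat.le_of_succ_le_succ hl)) hs
              ([] ++ '\n' :: List.replicate ((loopA2inner rest 0).1 - hs) ' ')]
        simp
      · rw [ih rest (Nat.le_of_succ_le_succ hl) hs (acc ++ [c]),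
            ih rest (Nat.le_of_succ_le_succ hl) hs ([] ++ [c])]
        simp

theorem loopA2_copy : ∀ (pre : List Char), '\n' ∉ pre →
    ∀ (t : List Char) (hs : Nat) (acc : List Char),
    loopA2 (pre ++ t) hs acc = loopA2 t hs (acc ++ pre) := by
  intro pre
  induction pre with
  | nil => intro _ t hs acc; simp
  | cons c p ih =>
    intro hnl t hs acc
    have hc : ¬ c = '\n' := fun h => hnl (h ▸ List.mem_cons_self)
    simp only [List.cons_append, loopA2, hc, if_false]
    rw [ih (fun h => hnl (List.mem_cons_of_mem c h)) t hs (acc ++ [c])]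
    simp

theorem loopA2_spec : ∀ (segs : List (List Char)) (pre : List Char) (hs : Nat),
    '\n' ∉ pre → (∀ seg ∈ segs, '\n' ∉ seg) →
    loopA2 (pre ++ glueNL segs) hs [] = pre ++ segs.flatMap (fun z => '\n' :: pvBLine hs z) := by
  intro segs
  induction segs with
  | nil =>
    intro pre hs hnl _
    simp only [glueNL, List.flatMap_nil, List.append_nil]
    have := loopA2_copy pre hnl [] hs []
    simpa [loopA2] using this
  | cons z rs ih =>
    intro pre hs hnl hsegs
    have hz : '\n' ∉ z := hsegs z List.mem_cons_self
    have hrs : ∀ seg ∈ rs, '\n' ∉ seg := fun seg h => hsegs seg (List.mem_cons_of_mem z h)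
    rw [glueNL_cons, loopA2_copy pre hnl _ hs []]
    simp only [loopA2, if_true, List.nil_append]
    have hinner := loopA2inner_spec z (glueNL rs) 0 hz
      (by cases rs with
          | nil => left; simp [glueNL]
          | cons y rs' => exact Or.inr ⟨y ++ glueNL rs', by rw [glueNL_cons]⟩)
    rw [Nat.zero_add] at hinner
    rw [hinner]
    have hdropnl : '\n' ∉ z.drop (pvLead z) := fun h => hz (List.drop_subset _ _ h)
    rw [loopA2_acc ((z.drop (pvLead z) ++ glueNL rs).length) _ (le_refl _) hs
          (pre ++ '\n' :: List.replicate (pvLead z - hs) ' ')]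
    rw [show (loopA2 (z.drop (pvLead z) ++ glueNL rs) hs [] : List Char)
        = z.drop (pvLead z) ++ rs.flatMap (fun w => '\n' :: pvBLine hs w) from ih _ hs hdropnl hrs]
    simp only [List.flatMap_cons, pvBLine]
    simp

-- ===== VERDICT (by name: the statement is the Claim_ definition above) =====
theorem loopA1_toList_spec (l : List Char) (seg : List Char) (rest : List (List Char))
    (h : dropBlank (splitNL l) = seg :: rest) :
    loopA1 l 0 = (pvLead seg, seg.drop (pvLead seg) ++ glueNL rest) := by
  have := A1_spec (splitNL l) seg rest (fun x hx => splitNL_no_nl l x hx) h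
  rwa [joinNL_splitNL] at this

theorem pull_left_string_py_spec : Claim_equal_pull_left_string_py := by
  intro s _
  unfold Spec_pull_left_string_py
  cases h : dropBlank (splitNL s.toList) with
  | nil =>
    have h2 : (loopA1 s.toList 0).2 = [] := by
      have := A1_all_blank (splitNL s.toList) 0 (dropBlank_eq_nil _ h)
      rwa [joinNL_splitNL] at this
    unfold pull_left_string_py pull_left_string_py_alt
    rw [splitOn_nl, h]
    simp [h2]
  | cons seg rest =>
    have hA1 := loopA1_toList_spec s.toList seg rest h
    have hmem := dropBlank_mem (splitNL s.toList) seg rest h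
    have hnlseg : '\n' ∉ seg := splitNL_no_nl s.toList seg (hmem seg List.mem_cons_self)
    have hnlrest : ∀ z ∈ rest, '\n' ∉ z :=
      fun z hz => splitNL_no_nl s.toList z (hmem z (List.mem_cons_of_mem seg hz))
    have hcontent : pvLead seg ≠ seg.length := dropBlank_head_content _ seg rest h
    have hdropne : seg.drop (pvLead seg) ≠ [] := by
      intro hd
      have := List.length_eq_zero_iff.mpr hd
      rw [List.length_drop] at this
      have := pvLead_le_length seg
      omega
    have hdropnl : '\n' ∉ seg.drop (pvLead seg) := fun hm => hnlseg (List.drop_subset _ _ hm)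
    have hemp : (seg.drop (pvLead seg) ++ glueNL rest).isEmpty = false := by
      cases hd : seg.drop (pvLead seg) with
      | nil => exact absurd hd hdropne
      | cons a b => simp
    have hB : pull_left_string_py_alt s
        = String.ofList (PySem.Chars.join ['\n']
            (seg.drop (pvLead seg) :: rest.map (pvBLine (pvLead seg)))) := by
      unfold pull_left_string_py_alt
      rw [splitOn_nl, h]
    have hA : pull_left_string_py s
        = String.ofList (loopA2 (seg.drop (pvLead seg) ++ glueNL rest) (pvLead seg) []) := by
      unfold pull_left_string_py
      simp only [hA1]
      simp [hemp]
    rw [hA, hB]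
    rw [loopA2_spec rest (seg.drop (pvLead seg)) (pvLead seg) hdropnl hnlrest]
    rw [join_nl_eq]
    simp [glueNL, List.flatMap_map]
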